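-- pv_equiv track=rewrite | github.com/bichngocdo/neural-tree-reranking | rcnnrr/reranker_gcn/data_reader.py | _extract_info
-- ===== SOURCE A (Python) =====
-- def _extract_info(heads, labels):
--     head_child_map = dict()
--     for i, head in enumerate(heads):
--         child = i + 1
--         head_child_map.setdefault(head, list()).append(child)
--     in_edges = [[-1]] + [[h] for h in heads]
--     in_labels = [[]] + [[l] for l in labels]
--     out_edges = list()
--     out_labels = list()
--     for node in range(len(heads) + 1):
--         if node in head_child_map:
--             out_edges.append(head_child_map[node])
--             out_labels.append([labels[i - 1] for i in head_child_map[node]])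
--         else:
--             out_edges.append([])
--             out_labels.append([])
--
--     return in_edges, in_labels, out_edges, out_labels
-- ===== SOURCE B (Python) =====
-- def _extract_info(heads, labels):
--     n = len(heads)
--     in_edges = [[-1]] + [[h] for h in heads]
--     in_labels = [[]] + [[l] for l in labels]
--     # sort-then-sweep: stable-sort the (head, child) pairs by head, then a single
--     # two-pointer sweep over nodes 0..n cuts the sorted run into per-node groups
--     pairs = sorted(((h, c) for c, h in enumerate(heads, 1) if 0 <= h <= n),
--                    key=lambda p: p[0])
--     out_edges, out_labels = [], []
--     j = 0
--     for node in range(n + 1):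
--         es, ls = [], []
--         while j < len(pairs) and pairs[j][0] == node:
--             es.append(pairs[j][1])
--             ls.append(labels[pairs[j][1] - 1])
--             j += 1
--         out_edges.append(es)
--         out_labels.append(ls)
--     return in_edges, in_labels, out_edges, out_labels
-- ===== Notes on version B (the rewrite author's own statement) =====
-- stated objective: alternative
-- what changed: B replaces A's head->children dict grouping by sort-then-sweep: it stable-sorts the (head, child) pairs by head and then cuts the sorted run into per-node groups with a single two-pointer sweep over nodes 0..n, so no dict and no per-node lookup remain.
import Mathlib
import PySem

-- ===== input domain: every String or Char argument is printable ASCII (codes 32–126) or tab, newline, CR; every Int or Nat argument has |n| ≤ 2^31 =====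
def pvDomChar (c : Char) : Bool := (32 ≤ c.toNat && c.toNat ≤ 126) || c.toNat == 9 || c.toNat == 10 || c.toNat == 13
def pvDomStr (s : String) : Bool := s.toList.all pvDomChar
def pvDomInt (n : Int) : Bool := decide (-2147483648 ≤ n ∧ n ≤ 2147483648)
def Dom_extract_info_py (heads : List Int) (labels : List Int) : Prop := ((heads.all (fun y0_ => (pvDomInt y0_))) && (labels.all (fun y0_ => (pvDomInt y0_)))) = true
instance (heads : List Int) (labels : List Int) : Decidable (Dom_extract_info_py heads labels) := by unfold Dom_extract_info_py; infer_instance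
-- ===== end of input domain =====

-- B replaces A's head->children dict grouping by sort-then-sweep: it stable-sorts the (head, child)
-- pairs by head and cuts the sorted run into per-node groups with one two-pointer sweep
-- (objective: alternative).

-- ===== PORT A =====
-- literal transliteration of _extract_info: setdefault(h, []).append(c) is Dict.modify h [] (· ++ [c]);
-- labels[i-1] is pyGetD labels (i-1) 0 (exact wherever Python does not raise, i.e. inside Pre_);
-- head_child_map[node] in the contains-branch is getD node [] (equal to the stored value there).
def extract_info_py (heads : List Int) (labels : List Int) :
    List (List Int) × List (List Int) × List (List Int) × List (List Int) :=
  let head_child_map :=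
    (PySem.List.enumerate heads).foldl
      (fun d p => d.modify p.2 [] (fun v => v ++ [p.1 + 1])) PySem.Dict.empty
  let in_edges := [[-1]] ++ heads.map (fun h => [h])
  let in_labels := [([] : List Int)] ++ labels.map (fun l => [l])
  let out :=
    (PySem.List.pyRange 0 ((heads.length : Int) + 1) 1).foldl
      (fun (acc : List (List Int) × List (List Int)) node =>
        if head_child_map.contains node then
          (acc.1 ++ [head_child_map.getD node []],
           acc.2 ++ [(head_child_map.getD node []).map
                       (fun i => PySem.List.pyGetD labels (i - 1) 0)])
        else
          (acc.1 ++ [[]], acc.2 ++ [[]]))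
      ([], [])
  (in_edges, in_labels, out.1, out.2)

-- ===== PORT B =====
-- pvMerge is Source B's 'for node … while pairs[j][0] == node' two-pointer sweep: the inner while takes
-- the maximal prefix of the remaining pairs with head = node (takeWhile/dropWhile on the suffix at
-- pointer j); labels[c-1] is pyGetD labels (c-1) 0 (exact inside Pre_).
def pvMerge (labels : List Int) : List Int → List (Int × Int) → List (List Int) × List (List Int)
  | [], _ => ([], [])
  | node :: rest, ps =>
    let g := ps.takeWhile (fun p => p.1 == node)
    let r := pvMerge labels rest (ps.dropWhile (fun p => p.1 == node))
    (g.map (fun p => p.2) :: r.1,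
     g.map (fun p => PySem.List.pyGetD labels (p.2 - 1) 0) :: r.2)

-- literal transliteration of Source B: the generator '(h, c) for c, h in enumerate(heads, 1) if 0<=h<=n'
-- is filter-then-swap of enumerate(heads, 1); sorted(…, key=lambda p: p[0]) is PySem.List.sorted
-- with key fst (stable); the node loop is pvMerge above.
def extract_info_py_alt (heads : List Int) (labels : List Int) :
    List (List Int) × List (List Int) × List (List Int) × List (List Int) :=
  let n := heads.length
  let in_edges := [[-1]] ++ heads.map (fun h => [h])
  let in_labels := [([] : List Int)] ++ labels.map (fun l => [l])
  let pairs := PySem.List.sorted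
    (((PySem.List.enumerate heads 1).filter
        (fun p => decide (0 ≤ p.2) && decide (p.2 ≤ (n : Int)))).map (fun p => (p.2, p.1)))
    (fun p => p.1) false
  let out := pvMerge labels (PySem.List.pyRange 0 ((n : Int) + 1) 1) pairs
  (in_edges, in_labels, out.1, out.2)

-- ===== PRECONDITION & SPEC =====
-- Pre_ excludes exactly the inputs where Python raises IndexError (both A and B do): a position i
-- whose head lies in [0, len(heads)] but i ≥ len(labels), so labels[i] / labels[child-1] is read
-- out of range.
def Pre_extract_info_py (heads : List Int) (labels : List Int) : Prop :=
  ∀ i < heads.length,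
    (0 ≤ heads.getD i 0 ∧ heads.getD i 0 ≤ (heads.length : Int)) → i < labels.length
instance (heads : List Int) (labels : List Int) : Decidable (Pre_extract_info_py heads labels) := by
  unfold Pre_extract_info_py; infer_instance
def pvWitness_extract_info_py : List Int × List Int := ([2, 0, 1], [10, 20, 30])
def Spec_extract_info_py (heads : List Int) (labels : List Int) (out : List (List Int) × List (List Int) × List (List Int) × List (List Int)) : Prop := out = extract_info_py_alt heads labels
instance (heads : List Int) (labels : List Int) (out : List (List Int) × List (List Int) × List (List Int) × List (List Int)) : Decidable (Spec_extract_info_py heads labels out) := by unfold Spec_extract_info_py; infer_instance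

-- ===== CLAIM (what is proved, stated in full; the proofs are below) =====
def Claim_equal_extract_info_py : Prop := ∀ (heads : List Int) (labels : List Int), Dom_extract_info_py heads labels → Pre_extract_info_py heads labels → Spec_extract_info_py heads labels (extract_info_py heads labels)

-- ===== LEMMAS AND PROOFS =====

-- enumerate with start s is enumerate from 0 with indices shifted
theorem pv_enumerate_shift (heads : List Int) (s : Int) :
    PySem.List.enumerate heads s
      = (PySem.List.enumerate heads 0).map (fun p => (p.1 + s, p.2)) := by
  induction heads generalizing s with
  | nil => rfl
  | cons x t ih =>
    have h1 : PySem.List.enumerate (x :: t) s = (s, x) :: PySem.List.enumerate t (s + 1) := rfl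
    have h2 : PySem.List.enumerate (x :: t) 0 = (0, x) :: PySem.List.enumerate t 1 := rfl
    rw [h1, h2, ih (s + 1), ih 1]
    simp only [List.map_cons, List.map_map, zero_add]
    refine congrArg _ (List.map_congr_left fun p _ => ?_)
    simp; ring

-- insertBy walks past a prefix it does not go before
theorem pv_insertBy_append {α : Type} (bf : α → α → Bool) (x : α) (l1 l2 : List α)
    (h : ∀ y ∈ l1, bf x y = false) :
    PySem.List.insertBy bf x (l1 ++ l2) = l1 ++ PySem.List.insertBy bf x l2 := by
  induction l1 with
  | nil => rfl
  | cons a t ih =>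
    have ha : bf x a = false := h a (by simp)
    simp only [List.cons_append, PySem.List.insertBy, ha, Bool.false_eq_true, if_false]
    exact congrArg _ (ih fun y hy => h y (by simp [hy]))

-- the stable sort by key fst of a list whose keys all lie in a strictly increasing list ks
-- is the concatenation, over k ∈ ks in order, of the key-k elements in original order
theorem pv_sorted_join (ks : List Int) (L : List (Int × Int))
    (hks : ks.Pairwise (· < ·)) (hcov : ∀ p ∈ L, p.1 ∈ ks) :
    PySem.List.sorted L (fun p => p.1) false
      = (ks.map (fun k => L.filter (fun p => p.1 == k))).flatten := by
  induction L using List.reverseRecOn with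
  | nil => simp [PySem.List.sorted]
  | append_singleton L x ih =>
    have hcovL : ∀ p ∈ L, p.1 ∈ ks := fun p hp => hcov p (by simp [hp])
    have hsortstep : PySem.List.sorted (L ++ [x]) (fun p => p.1) false
        = PySem.List.insertBy (fun a b => decide (a.1 < b.1)) x
            (PySem.List.sorted L (fun p => p.1) false) := by
      rw [PySem.List.sorted_eq_foldl_insertBy, List.foldl_append,
          ← PySem.List.sorted_eq_foldl_insertBy]
      rfl
    rw [hsortstep, ih hcovL]
    obtain ⟨ks1, ks2, hsplit⟩ := List.append_of_mem (hcov x (by simp))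
    subst hsplit
    have hpw := hks
    rw [List.pairwise_append] at hpw
    obtain ⟨hpw1, hpw2, hcross⟩ := hpw
    have hlt1 : ∀ k ∈ ks1, k < x.1 := fun k hk => hcross k hk x.1 (by simp)
    have hlt2 : ∀ k ∈ ks2, x.1 < k := fun k hk => (List.pairwise_cons.mp hpw2).1 k hk
    -- abbreviations
    set g := fun k => L.filter (fun p => p.1 == k) with hg
    have hdecomp : ((ks1 ++ x.1 :: ks2).map g).flatten
        = ((ks1.map g).flatten ++ g x.1) ++ (ks2.map g).flatten := by
      simp [List.map_append]
    rw [hdecomp]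
    have hpre : ∀ y ∈ (ks1.map g).flatten ++ g x.1,
        (fun a b : Int × Int => decide (a.1 < b.1)) x y = false := by
      intro y hy
      rcases List.mem_append.mp hy with hy1 | hy2
      · obtain ⟨l, hl, hyl⟩ := List.mem_flatten.mp hy1
        obtain ⟨k, hk, rfl⟩ := List.mem_map.mp hl
        have : y.1 = k := by simpa using (List.of_mem_filter hyl)
        simp only [decide_eq_false_iff_not, not_lt, this]
        exact le_of_lt (hlt1 k hk)
      · have : y.1 = x.1 := by simpa using (List.of_mem_filter hy2)
        simp [this]
    rw [pv_insertBy_append _ _ _ _ hpre]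
    have hins : PySem.List.insertBy (fun a b : Int × Int => decide (a.1 < b.1)) x
        ((ks2.map g).flatten) = x :: (ks2.map g).flatten := by
      cases hfl : (ks2.map g).flatten with
      | nil => rfl
      | cons b t =>
        have hb : b ∈ (ks2.map g).flatten := by rw [hfl]; simp
        obtain ⟨l, hl, hbl⟩ := List.mem_flatten.mp hb
        obtain ⟨k, hk, rfl⟩ := List.mem_map.mp hl
        have hb1 : b.1 = k := by simpa using (List.of_mem_filter hbl)
        have : (fun a b : Int × Int => decide (a.1 < b.1)) x b = true := by
          simp only [decide_eq_true_eq, hb1]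
          exact hlt2 k hk
        simp [PySem.List.insertBy, this]
    rw [hins]
    -- now compute the RHS groups of L ++ [x]
    have hgx : ∀ k : Int, (L ++ [x]).filter (fun p => p.1 == k)
        = g k ++ (if x.1 == k then [x] else []) := by
      intro k
      rw [List.filter_append]
      cases h : (x.1 == k) <;> simp [hg, h]
    have h1 : ks1.map (fun k => (L ++ [x]).filter (fun p => p.1 == k)) = ks1.map g := by
      refine List.map_congr_left fun k hk => ?_
      rw [hgx k]
      have : (x.1 == k) = false := by
        simp only [beq_eq_false_iff_ne, ne_eq]
        intro h; exact absurd (hlt1 k hk) (by omega)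
      simp [this]
    have h2 : ks2.map (fun k => (L ++ [x]).filter (fun p => p.1 == k)) = ks2.map g := by
      refine List.map_congr_left fun k hk => ?_
      rw [hgx k]
      have : (x.1 == k) = false := by
        simp only [beq_eq_false_iff_ne, ne_eq]
        intro h; exact absurd (hlt2 k hk) (by omega)
      simp [this]
    simp only [List.map_append, List.map_cons, List.flatten_append, List.flatten_cons,
      h1, h2, hgx x.1, BEq.rfl, if_pos]
    simp

-- the sweep over a concatenation of strictly-increasing-key groups peels one group per node
theorem pv_merge_join (labels : List Int) (ks : List Int) (gs : Int → List (Int × Int))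
    (hks : ks.Pairwise (· < ·))
    (hg : ∀ k ∈ ks, ∀ p ∈ gs k, p.1 = k) :
    pvMerge labels ks ((ks.map gs).flatten)
      = (ks.map (fun k => (gs k).map (fun p => p.2)),
         ks.map (fun k => (gs k).map (fun p => PySem.List.pyGetD labels (p.2 - 1) 0))) := by
  induction ks with
  | nil => rfl
  | cons node rest ih =>
    have hpw := List.pairwise_cons.mp hks
    have hrest_ne : ∀ b ∈ (rest.map gs).flatten, (b.1 == node) = false := by
      intro b hb
      obtain ⟨l, hl, hbl⟩ := List.mem_flatten.mp hb
      obtain ⟨k, hk, rfl⟩ := List.mem_map.mp hl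
      have hb1 : b.1 = k := hg k (by simp [hk]) b hbl
      have : node < k := hpw.1 k hk
      simp only [beq_eq_false_iff_ne, ne_eq, hb1]
      omega
    have hall : ∀ p ∈ gs node, ((fun p : Int × Int => p.1 == node) p) = true := by
      intro p hp
      simp [hg node (by simp) p hp]
    have htake : (gs node ++ (rest.map gs).flatten).takeWhile (fun p => p.1 == node) = gs node := by
      rw [List.takeWhile_append, List.takeWhile_eq_self_iff.mpr hall]
      simp only [if_pos]
      have : (rest.map gs).flatten.takeWhile (fun p => p.1 == node) = [] := by
        cases hfl : (rest.map gs).flatten with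
        | nil => rfl
        | cons b t =>
          have hb : b ∈ (rest.map gs).flatten := by rw [hfl]; simp
          simp [hrest_ne b hb]
      simp [this]
    have hdrop : (gs node ++ (rest.map gs).flatten).dropWhile (fun p => p.1 == node)
        = (rest.map gs).flatten := by
      rw [List.dropWhile_append, List.dropWhile_eq_nil_iff.mpr hall]
      simp only [List.isEmpty_nil, if_pos]
      cases hfl : (rest.map gs).flatten with
      | nil => rfl
      | cons b t =>
        have hb : b ∈ (rest.map gs).flatten := by rw [hfl]; simp
        simp [hrest_ne b hb]
    have ihr := ih (List.Pairwise.sublist (List.sublist_cons_self node rest) hks)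
      (fun k hk => hg k (by simp [hk]))
    simp only [pvMerge, List.map_cons, List.flatten_cons, htake, hdrop, ihr]

-- A's dict grouping characterised as a filter of the enumeration
theorem pv_dict_getD (heads : List Int) (c : Int) :
    ((PySem.List.enumerate heads).foldl
        (fun d p => d.modify p.2 [] (fun v => v ++ [p.1 + 1])) PySem.Dict.empty).getD c []
      = ((PySem.List.enumerate heads).filter (fun p => p.2 == c)).map (fun p => p.1 + 1) := by
  have h := PySem.Dict.getD_foldl_modify_append
      ((PySem.List.enumerate heads).map (fun p => (p.2, p.1 + 1)))
      (PySem.Dict.empty : PySem.Dict Int (List Int)) c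
  rw [List.foldl_map] at h
  simp only [h, List.filter_map]
  simp [Function.comp_def]

-- A's range loop with both branches merged: appending getD node [] in every case
theorem pv_fold_if_pair (d : PySem.Dict Int (List Int)) (f : Int → Int)
    (l : List Int) (acc : List (List Int) × List (List Int)) :
    l.foldl
      (fun (acc : List (List Int) × List (List Int)) node =>
        if d.contains node then
          (acc.1 ++ [d.getD node []],
           acc.2 ++ [(d.getD node []).map f])
        else (acc.1 ++ [[]], acc.2 ++ [[]])) acc
    = (acc.1 ++ l.map (fun node => d.getD node []),
       acc.2 ++ l.map (fun node => (d.getD node []).map f)) := by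
  induction l generalizing acc with
  | nil => simp
  | cons x t ih =>
    by_cases hc : d.contains x
    · simp [hc, ih]
    · have h0 := PySem.Dict.getD_of_not_contains d ([] : List Int)
        (by simpa using hc)
      simp [hc, ih, h0]

-- ===== VERDICT (by name: the statement is the Claim_ definition above) =====
theorem extract_info_py_spec : Claim_equal_extract_info_py := by
  intro heads labels _ _
  unfold Spec_extract_info_py extract_info_py extract_info_py_alt
  dsimp only
  refine Prod.ext rfl (Prod.ext rfl ?_)
  rw [pv_fold_if_pair]
  simp only [List.nil_append]
  -- notation
  set n := heads.length with hn
  set ks := PySem.List.pyRange 0 ((n : Int) + 1) 1 with hks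
  set L := ((PySem.List.enumerate heads 1).filter
      (fun p => decide (0 ≤ p.2) && decide (p.2 ≤ (n : Int)))).map (fun p => (p.2, p.1)) with hL
  -- membership facts about ks
  have hks_eq : ks = List.map (fun k : Nat => (k : Int)) (List.range (n + 1)) := by
    rw [hks, PySem.List.pyRange_zero]
    norm_num
  have hmem_ks : ∀ k : Int, 0 ≤ k → k ≤ (n : Int) → k ∈ ks := by
    intro k h0 h1
    rw [hks_eq, List.mem_map]
    exact ⟨k.toNat, List.mem_range.mpr (by omega), by omega⟩
  have hks_range : ∀ k ∈ ks, 0 ≤ k ∧ k ≤ (n : Int) := by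
    intro k hk
    rw [hks_eq, List.mem_map] at hk
    obtain ⟨j, hj, rfl⟩ := hk
    have := List.mem_range.mp hj
    omega
  have hks_pw : ks.Pairwise (· < ·) := by
    rw [hks]; exact PySem.List.pairwise_lt_pyRange_one 0 _
  -- the sorted pair list, as a concatenation of per-node groups
  have hcov : ∀ p ∈ L, p.1 ∈ ks := by
    intro p hp
    rw [hL, List.mem_map] at hp
    obtain ⟨q, hq, rfl⟩ := hp
    have := List.of_mem_filter hq
    simp only [Bool.and_eq_true, decide_eq_true_eq] at this
    exact hmem_ks _ this.1 this.2
  have hsorted := pv_sorted_join ks L hks_pw hcov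
  have hgmem : ∀ k ∈ ks, ∀ p ∈ L.filter (fun p => p.1 == k), p.1 = k := by
    intro k _ p hp
    simpa using List.of_mem_filter hp
  have hmerge := pv_merge_join labels ks (fun k => L.filter (fun p => p.1 == k)) hks_pw hgmem
  rw [hsorted, hmerge]
  -- per-node group of L, versus A's filtered enumeration, for k in range
  have hgroup : ∀ k : Int, 0 ≤ k → k ≤ (n : Int) →
      L.filter (fun p => p.1 == k)
        = ((PySem.List.enumerate heads 0).filter (fun p => p.2 == k)).map
            (fun p => (p.2, p.1 + 1)) := by
    intro k h0 h1
    rw [hL, List.filter_map, List.filter_filter]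
    have hpt : ∀ p ∈ PySem.List.enumerate heads 1,
        (((fun p : Int × Int => p.1 == k) ∘ (fun p : Int × Int => (p.2, p.1))) p
           && (decide (0 ≤ p.2) && decide (p.2 ≤ (n : Int))))
        = (p.2 == k) := by
      intro p _
      by_cases hpk : p.2 = k
      · simp [hpk, h0, h1]
      · simp [hpk]
    rw [List.filter_congr hpt]
    rw [pv_enumerate_shift heads 1, List.filter_map, List.map_map]
    have : ((fun p : Int × Int => p.2 == k) ∘ (fun p : Int × Int => (p.1 + 1, p.2)))
        = (fun p : Int × Int => p.2 == k) := by
      funext p; rfl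
    rw [this]
    rfl
  refine Prod.ext ?_ ?_
  · dsimp only
    refine List.map_congr_left fun node hnode => ?_
    obtain ⟨h0, h1⟩ := hks_range node hnode
    rw [pv_dict_getD heads node, hgroup node h0 h1, List.map_map]
    rfl
  · dsimp only
    refine List.map_congr_left fun node hnode => ?_
    obtain ⟨h0, h1⟩ := hks_range node hnode
    rw [pv_dict_getD heads node, hgroup node h0 h1, List.map_map, List.map_map]
    refine List.map_congr_left fun p _ => ?_
    simp
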